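-- pv_equiv track=rewrite | github.com/chrisleavoy/aoc | 2021/day13/test_day13.py | sol1
-- ===== SOURCE A (Python) =====
-- def sol1(data, break_early=True):
--     grid, folds = data
--     for f in folds:
--         axis, num = f.split('=')
--         num = int(num)
--         grid = fold(grid, axis, num)
--         if break_early:
--             break
--     result = 0
--     for row in grid:
--         for col in row:
--             result += 1 if col == '#' else 0
--     return result
--
-- def fold(grid, axis, num):
--     if axis == 'y':
--         # assert len(grid)/2 == num
--         for y in range(num):
--             for x in range(len(grid[y])):
--                 mirror = len(grid) - y - 1
--                 if grid[mirror][x] == '#':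
--                     grid[y][x] = '#'
--             # grid[y] = grid[y][:num]
--         return grid[:num]
--     if axis == 'x':
--         length = len(grid[0])
--         assert length/2 == num
--         for y in range(len(grid)):
--             for x in range(num):
--                 mirror = len(grid[y]) - x - 1
--                 if grid[y][mirror] == '#':
--                     grid[y][x] = '#'
--             grid[y] = grid[y][:num]
--         return grid
--     raise ValueError('oops')
-- ===== SOURCE B (Python) =====
-- def sol1(data, break_early=True):
--     # Set-based refold: collect the '#' coordinates once, then reflect points
--     # through each fold line instead of rewriting the grid cell by cell.
--     # (A mutates the input grid in place; B leaves it untouched -- the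
--     # equivalence claimed is about the return value only.)
--     grid, folds = data
--     height = len(grid)
--     width = len(grid[0]) if grid else 0
--     pts = {(x, y) for y, row in enumerate(grid) for x, c in enumerate(row) if c == '#'}
--     for f in folds:
--         axis, num = f.split('=')
--         num = int(num)
--         if axis == 'y':
--             pts = {(x, y) for (x, y) in pts if y < num} | \
--                   {(x, height - 1 - y) for (x, y) in pts if height - 1 - y < num}
--             height = num
--         elif axis == 'x':
--             assert width / 2 == num
--             pts = {(x, y) for (x, y) in pts if x < num} | \
--                   {(width - 1 - x, y) for (x, y) in pts if width - 1 - x < num}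
--             width = num
--         else:
--             raise ValueError('oops')
--         if break_early:
--             break
--     return len(pts)
-- ===== Notes on version B (the rewrite author's own statement) =====
-- stated objective: alternative
-- what changed: B keeps only the set of '#' coordinates plus the grid's height and width and reflects points through each fold line with set comprehensions, instead of A's in-place cell-by-cell grid mutation followed by a recount pass; A mutates the input grid in place while B leaves it untouched (the claim is about the return value). …
-- outside the precondition, e.g. on sol1(([['.'], ['.', '#']], ['y=1']), True): A returns 0, B returns 1; on sol1(([['#'], ['#']], ['y=-1']), True): A returns 1, B returns 0
import Mathlib
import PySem

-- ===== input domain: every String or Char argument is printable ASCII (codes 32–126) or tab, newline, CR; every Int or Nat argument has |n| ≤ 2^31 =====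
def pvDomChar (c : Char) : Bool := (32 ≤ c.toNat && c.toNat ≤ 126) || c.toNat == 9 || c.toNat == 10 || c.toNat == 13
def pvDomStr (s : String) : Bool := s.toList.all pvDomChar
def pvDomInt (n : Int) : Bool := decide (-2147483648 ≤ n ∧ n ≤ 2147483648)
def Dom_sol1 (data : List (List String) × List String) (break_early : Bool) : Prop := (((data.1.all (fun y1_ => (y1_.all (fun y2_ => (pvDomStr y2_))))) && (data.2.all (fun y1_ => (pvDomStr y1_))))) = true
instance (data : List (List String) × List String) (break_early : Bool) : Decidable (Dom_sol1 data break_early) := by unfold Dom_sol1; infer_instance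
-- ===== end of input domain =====

-- B replaces A's in-place cell-by-cell grid mutation and recount with a set of '#'
-- coordinates (plus the grid's height and width) reflected through each fold line;
-- A mutates its grid argument in place, B does not — the equivalence claimed is
-- about the return value.

-- ===== PORT A =====
-- Python mutates the grid; ported with functional updates, Option none = Python's exception paths.

-- mirror = len(grid) - y - 1; if grid[mirror][x] == '#': grid[y][x] = '#'
def pvMergeStepA (g : List (List String)) (y x : Int) : Option (List (List String)) :=
  (PySem.List.pyGet? g ((g.length : Int) - y - 1)).bind (fun rowm =>
    (PySem.List.pyGet? rowm x).bind (fun v =>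
      if v = "#" then
        (PySem.List.pyGet? g y).bind (fun rowy =>
          (PySem.List.pySet? rowy x "#").bind (fun rowy' =>
            PySem.List.pySet? g y rowy'))
      else some g))

-- for x in range(len(grid[y])): …
def pvYRowA (g : List (List String)) (y : Int) : Option (List (List String)) :=
  (PySem.List.pyGet? g y).bind (fun row =>
    (PySem.List.pyRange 0 (row.length : Int) 1).foldl
      (fun og x => og.bind (fun g' => pvMergeStepA g' y x)) (some g))

-- for y in range(num): …
def pvYLoopA (g : List (List String)) (num : Int) : Option (List (List String)) :=
  (PySem.List.pyRange 0 num 1).foldl (fun og y => og.bind (fun g' => pvYRowA g' y)) (some g)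

-- mirror = len(grid[y]) - x - 1; if grid[y][mirror] == '#': grid[y][x] = '#'
def pvXCellA (g : List (List String)) (y x : Int) : Option (List (List String)) :=
  (PySem.List.pyGet? g y).bind (fun rowy =>
    (PySem.List.pyGet? rowy ((rowy.length : Int) - x - 1)).bind (fun v =>
      if v = "#" then
        (PySem.List.pySet? rowy x "#").bind (fun rowy' =>
          PySem.List.pySet? g y rowy')
      else some g))

-- for x in range(num): …  then  grid[y] = grid[y][:num]
def pvXRowA (g : List (List String)) (y num : Int) : Option (List (List String)) :=
  ((PySem.List.pyRange 0 num 1).foldl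
      (fun og x => og.bind (fun g' => pvXCellA g' y x)) (some g)).bind
    (fun g' =>
      (PySem.List.pyGet? g' y).bind (fun row =>
        PySem.List.pySet? g' y (PySem.List.slice row none (some num))))

-- for y in range(len(grid)): …
def pvXLoopA (g : List (List String)) (num : Int) : Option (List (List String)) :=
  (PySem.List.pyRange 0 (g.length : Int) 1).foldl
    (fun og y => og.bind (fun g' => pvXRowA g' y num)) (some g)

def pvFoldA (g : List (List String)) (axis : String) (num : Int) : Option (List (List String)) :=
  if axis = "y" then
    (pvYLoopA g num).map (fun g' => PySem.List.slice g' none (some num))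
  else if axis = "x" then
    (PySem.List.pyGet? g 0).bind (fun r0 =>   -- len(grid[0]): IndexError on the empty grid
      -- assert length / 2 == num: true division, holds exactly iff length = 2*num
      if (r0.length : Int) = 2 * num then pvXLoopA g num else none)
  else none                     -- raise ValueError('oops')

def pvLoopA (g : List (List String)) (fs : List String) (be : Bool) : Option (List (List String)) :=
  match fs with
  | [] => some g
  | f :: rest =>
    match PySem.Str.split? f "=" with
    | some [axis, s] =>
      (PySem.Int.ofStr? s).bind (fun num =>   -- int(num): ValueError = none
        (pvFoldA g axis num).bind (fun g' =>
          if be then some g' else pvLoopA g' rest be))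
    | _ => none                 -- unpacking 'axis, num = …': ValueError

def sol1 (data : List (List String) × List String) (break_early : Bool) : Int :=
  match pvLoopA data.1 data.2 break_early with
  | none => 0                   -- unreachable under Pre_sol1: Python raises here
  | some g =>
    g.foldl (fun result row => row.foldl (fun r col => r + if col = "#" then 1 else 0) result) 0

-- ===== PORT B =====
-- {(x, y) for y, row in enumerate(grid) for x, c in enumerate(row) if c == '#'}
def pvPointsB (grid : List (List String)) : List (Int × Int) :=
  (PySem.List.enumerate grid 0).flatMap (fun yr =>
    (PySem.List.enumerate yr.2 0).filterMap (fun xc =>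
      if xc.2 = "#" then some (xc.1, yr.1) else none))

-- {(x,y) in pts if y < num} | {(x, height-1-y) for (x,y) in pts if height-1-y < num}
def pvYFoldB (pts : List (Int × Int)) (H num : Int) : List (Int × Int) :=
  PySem.Set.union
    (PySem.Set.ofList (pts.filter (fun p => decide (p.2 < num))))
    (PySem.Set.ofList (pts.filterMap (fun p =>
      if H - 1 - p.2 < num then some (p.1, H - 1 - p.2) else none)))

-- {(x,y) in pts if x < num} | {(width-1-x, y) for (x,y) in pts if width-1-x < num}
def pvXFoldB (pts : List (Int × Int)) (W num : Int) : List (Int × Int) :=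
  PySem.Set.union
    (PySem.Set.ofList (pts.filter (fun p => decide (p.1 < num))))
    (PySem.Set.ofList (pts.filterMap (fun p =>
      if W - 1 - p.1 < num then some (W - 1 - p.1, p.2) else none)))

def pvLoopB (pts : List (Int × Int)) (H W : Int) (fs : List String) (be : Bool) :
    Option (List (Int × Int)) :=
  match fs with
  | [] => some pts
  | f :: rest =>
    match PySem.Str.split? f "=" with
    | some [axis, s] =>
      (PySem.Int.ofStr? s).bind (fun num =>
        if axis = "y" then
          if be then some (pvYFoldB pts H num)
          else pvLoopB (pvYFoldB pts H num) num W rest be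
        else if axis = "x" then
          if W = 2 * num then   -- assert width / 2 == num
            if be then some (pvXFoldB pts W num)
            else pvLoopB (pvXFoldB pts W num) H num rest be
          else none
        else none)              -- raise ValueError('oops')
    | _ => none

def sol1_alt (data : List (List String) × List String) (break_early : Bool) : Int :=
  -- height = len(grid); width = len(grid[0]) if grid else 0
  match pvLoopB (PySem.Set.ofList (pvPointsB data.1)) (data.1.length : Int)
      (((data.1.headD []).length : Int)) data.2 break_early with
  | none => 0
  | some pts => (pts.length : Int)   -- len(pts)

-- ===== PRECONDITION & SPEC =====
-- every fold that will be processed parses and is geometrically valid for the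
-- successively folded grid's dimensions (dimension recurrence: a y-fold sets the
-- height to num, an x-fold requires width = 2*num and sets the width to num)
def pvFoldsOK (H W : Int) (fs : List String) (be : Bool) : Bool :=
  match fs with
  | [] => true
  | f :: rest =>
    match PySem.Str.split? f "=" with
    | some [axis, s] =>
      match PySem.Int.ofStr? s with
      | some num =>
        if axis = "y" then decide (0 ≤ num) && decide (num ≤ H) && (be || pvFoldsOK num W rest be)
        else if axis = "x" then decide (1 ≤ H) && decide (W = 2 * num) && (be || pvFoldsOK H num rest be)
        else false
      | none => false
    | _ => false

-- Pre_ excludes (when at least one fold is processed): ragged grids and negative or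
-- too-large fold coordinates — there A either raises (IndexError/AssertionError) or
-- survives only through negative-index wraparound / negative slicing, returning an
-- accidental count (see the cited examples) — and, for break_early=False, fold lists
-- whose later folds are invalid for the successively folded grid, where A raises.
def Pre_sol1 (data : List (List String) × List String) (break_early : Bool) : Prop :=
  data.2 = [] ∨
    ((data.1.all (fun row => row.length = (data.1.headD []).length)) = true ∧
      pvFoldsOK (data.1.length : Int) ((data.1.headD []).length : Int) data.2 break_early = true)
instance (data : List (List String) × List String) (break_early : Bool) : Decidable (Pre_sol1 data break_early) := by unfold Pre_sol1; infer_instance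

def pvWitness_sol1 : (List (List String) × List String) × Bool :=
  (([["#", "."], [".", "#"]], ["y=1"]), true)

def Spec_sol1 (data : List (List String) × List String) (break_early : Bool) (out : Int) : Prop := out = sol1_alt data break_early
instance (data : List (List String) × List String) (break_early : Bool) (out : Int) : Decidable (Spec_sol1 data break_early out) := by unfold Spec_sol1; infer_instance

-- ===== CLAIM (what is proved, stated in full; the proofs are below) =====
def Claim_equal_sol1 : Prop := ∀ (data : List (List String) × List String) (break_early : Bool), Dom_sol1 data break_early → Pre_sol1 data break_early → Spec_sol1 data break_early (sol1 data break_early)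

-- ===== LEMMAS AND PROOFS =====

-- ---------- generic list helpers ----------

lemma pvSomeBind {α β : Type} (a : α) (f : α → Option β) : (Option.some a).bind f = f a := rfl

lemma pvMapRangeGetD {α : Type} (l : List α) (d : α) :
    (List.range l.length).map (fun i => l.getD i d) = l := by
  apply List.ext_getElem (by simp)
  intro i h1 h2
  simp only [List.getElem_map, List.getElem_range]
  exact List.getD_eq_getElem l d h2

lemma pvSetSelf {α : Type} (l : List α) (n : Nat) (d : α) (h : n < l.length) :
    l.set n (l.getD n d) = l := by
  apply List.ext_getElem (by simp)
  intro i h1 h2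
  rw [List.getElem_set]
  split
  · next heq => subst heq; exact (List.getD_eq_getElem l d h2).symm ▸ rfl
  · rfl

-- ---------- the pure description of A's y-fold ----------

def pvMerge (a b : List String) : List String :=
  List.zipWith (fun c d => if d = "#" then "#" else c) a b

def pvMRow (g : List (List String)) (i : Nat) : List String :=
  pvMerge (g.getD i []) (g.getD (g.length - 1 - i) [])

def pvGA (g : List (List String)) (k : Nat) : List (List String) :=
  (List.range g.length).map (fun i => if i < k then pvMRow g i else g.getD i [])

def pvSrc (g : List (List String)) (k : Nat) : List String :=
  if g.length - 1 - k < k then pvMRow g (g.length - 1 - k) else g.getD (g.length - 1 - k) []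

def pvRA (row S : List String) (j : Nat) : List String :=
  (List.range row.length).map (fun x =>
    if x < j then (if S.getD x "" = "#" then "#" else row.getD x "") else row.getD x "")

lemma length_pvMerge (a b : List String) : (pvMerge a b).length = min a.length b.length :=
  List.length_zipWith

lemma getD_pvMerge (a b : List String) (x : Nat) (hx : x < a.length) (hab : a.length ≤ b.length) :
    (pvMerge a b).getD x "" = if b.getD x "" = "#" then "#" else a.getD x "" := by
  have hx2 : x < (pvMerge a b).length := by rw [length_pvMerge]; omega
  rw [List.getD_eq_getElem _ _ hx2, List.getD_eq_getElem a "" hx,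
    List.getD_eq_getElem b "" (by omega)]
  simp [pvMerge, List.getElem_zipWith]

lemma pvMerge_absorb (a b : List String) (hab : b.length = a.length) :
    pvMerge a (pvMerge b a) = pvMerge a b := by
  apply List.ext_getElem (by simp [length_pvMerge]; omega)
  intro i h1 h2
  simp only [pvMerge, List.getElem_zipWith]
  split_ifs <;> simp_all

lemma length_pvGA (g : List (List String)) (k : Nat) : (pvGA g k).length = g.length := by
  simp [pvGA]

lemma getD_pvGA (g : List (List String)) (k i : Nat) (h : i < g.length) :
    (pvGA g k).getD i [] = if i < k then pvMRow g i else g.getD i [] :=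
  PySem.List.getD_map_range _ _ _ _ h

lemma pvGA_zero (g : List (List String)) : pvGA g 0 = g := by
  unfold pvGA
  calc (List.range g.length).map (fun i => if i < 0 then pvMRow g i else g.getD i [])
      = (List.range g.length).map (fun i => g.getD i []) := by
        apply List.map_congr_left; intro i _; simp
    _ = g := pvMapRangeGetD g []

lemma pvRA_length (row S : List String) (j : Nat) : (pvRA row S j).length = row.length := by
  simp [pvRA]

lemma getD_pvRA (row S : List String) (j x : Nat) (h : x < row.length) :
    (pvRA row S j).getD x "" =
      if x < j then (if S.getD x "" = "#" then "#" else row.getD x "") else row.getD x "" :=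
  PySem.List.getD_map_range _ _ _ _ h

lemma pvRA_zero (row S : List String) : pvRA row S 0 = row := by
  unfold pvRA
  calc (List.range row.length).map (fun x =>
        if x < 0 then (if S.getD x "" = "#" then "#" else row.getD x "") else row.getD x "")
      = (List.range row.length).map (fun x => row.getD x "") := by
        apply List.map_congr_left; intro x _; simp
    _ = row := pvMapRangeGetD row ""

lemma pvRA_succ_pos (row S : List String) (j : Nat) (hv : S.getD j "" = "#")
    (hj : j < row.length) : (pvRA row S j).set j "#" = pvRA row S (j + 1) := by
  apply List.ext_getElem (by simp [pvRA])
  intro i h1 h2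
  have hi : i < row.length := by simpa [pvRA] using h2
  rw [List.getElem_set]
  simp only [pvRA, List.getElem_map, List.getElem_range]
  by_cases hij : j = i
  · subst hij
    rw [if_pos rfl, if_pos (show j < j + 1 by omega), if_pos hv]
  · rw [if_neg hij]
    exact if_congr (show i < j ↔ i < j + 1 by omega) rfl rfl

lemma pvRA_succ_neg (row S : List String) (j : Nat) (hv : ¬ S.getD j "" = "#") :
    pvRA row S j = pvRA row S (j + 1) := by
  apply List.ext_getElem (by simp [pvRA])
  intro i h1 h2
  have hi : i < row.length := by simpa [pvRA] using h1
  simp only [pvRA, List.getElem_map, List.getElem_range]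
  by_cases hij : i = j
  · rw [hij, if_neg (show ¬ j < j by omega), if_pos (show j < j + 1 by omega), if_neg hv]
  · exact if_congr (show i < j ↔ i < j + 1 by omega) rfl rfl

lemma pvRA_full (row S : List String) (hS : row.length ≤ S.length) :
    pvRA row S row.length = pvMerge row S := by
  apply List.ext_getElem (by simp [pvRA, length_pvMerge]; omega)
  intro i h1 h2
  have hi : i < row.length := by simpa [pvRA] using h1
  simp only [pvRA, List.getElem_map, List.getElem_range, pvMerge, List.getElem_zipWith]
  rw [if_pos hi, List.getD_eq_getElem S "" (by omega), List.getD_eq_getElem row "" hi]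
-- ---------- A's y-fold evaluates to the pure mirror-merge ----------

lemma pvMergeStep_eval (g : List (List String)) (k j : Nat)
    (hk : k < g.length) (hj : j < (g.getD k []).length)
    (hS : (g.getD k []).length ≤ (pvSrc g k).length) :
    pvMergeStepA ((pvGA g k).set k (pvRA (g.getD k []) (pvSrc g k) j)) (k : Int) (j : Int)
      = some ((pvGA g k).set k (pvRA (g.getD k []) (pvSrc g k) (j + 1))) := by
  set row := g.getD k [] with hrow
  set S := pvSrc g k with hSdef
  set G := (pvGA g k).set k (pvRA row S j) with hG
  have hGlen : G.length = g.length := by simp [hG, length_pvGA]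
  have hmG : g.length - 1 - k < G.length := by omega
  have e1 : PySem.List.pyGet? G ((G.length : Int) - (k : Int) - 1)
      = some G[g.length - 1 - k] := by
    have hc : ((G.length : Int) - (k : Int) - 1) = ((g.length - 1 - k : Nat) : Int) := by
      rw [hGlen]; omega
    rw [hc, PySem.List.pyGet?_natCast, List.getElem?_eq_getElem hmG]
  have hGm : G[g.length - 1 - k] = (if g.length - 1 - k = k then pvRA row S j else S) := by
    simp only [hG, List.getElem_set]
    by_cases hq : g.length - 1 - k = k
    · rw [if_pos hq.symm, if_pos hq]
    · rw [if_neg (fun h => hq h.symm), if_neg hq]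
      show (pvGA g k)[g.length - 1 - k]'(by rw [length_pvGA]; omega) = pvSrc g k
      simp only [pvGA, List.getElem_map, List.getElem_range]
      rfl
  have hread : PySem.List.pyGet? (if g.length - 1 - k = k then pvRA row S j else S) (j : Int)
      = some (S.getD j "") := by
    rw [PySem.List.pyGet?_natCast]
    by_cases hq : g.length - 1 - k = k
    · rw [if_pos hq]
      have hj' : j < (pvRA row S j).length := by rw [pvRA_length]; exact hj
      rw [List.getElem?_eq_getElem hj']
      congr 1
      have h1 : (pvRA row S j)[j] = (pvRA row S j).getD j "" :=
        (List.getD_eq_getElem _ "" hj').symm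
      rw [h1, getD_pvRA row S j j hj, if_neg (lt_irrefl j), hSdef]
      unfold pvSrc
      rw [hq, if_neg (lt_irrefl k)]
    · rw [if_neg hq, List.getElem?_eq_getElem (by omega : j < S.length),
        List.getD_eq_getElem S "" (by omega)]
  simp only [pvMergeStepA]
  rw [e1, pvSomeBind, hGm, hread, pvSomeBind]
  by_cases hv : S.getD j "" = "#"
  · rw [if_pos hv]
    have e2 : PySem.List.pyGet? G (k : Int) = some (pvRA row S j) := by
      rw [PySem.List.pyGet?_natCast, List.getElem?_eq_getElem (by omega : k < G.length)]
      congr 1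
      simp only [hG, List.getElem_set]
      rw [if_true]
    rw [e2, pvSomeBind]
    have e3 : PySem.List.pySet? (pvRA row S j) (j : Int) "#" = some ((pvRA row S j).set j "#") :=
      PySem.List.pySet?_natCast _ _ _ (by rw [pvRA_length]; exact hj)
    rw [e3, pvSomeBind]
    have e4 : PySem.List.pySet? G (k : Int) ((pvRA row S j).set j "#")
        = some (G.set k ((pvRA row S j).set j "#")) :=
      PySem.List.pySet?_natCast _ _ _ (by omega)
    rw [e4, hG, List.set_set, pvRA_succ_pos row S j hv hj]
  · rw [if_neg hv, hG, pvRA_succ_neg row S j hv]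

lemma pvYRow_fold (g : List (List String)) (k : Nat)
    (hk : k < g.length) (hS : (g.getD k []).length ≤ (pvSrc g k).length) :
    ∀ j : Nat, j ≤ (g.getD k []).length →
      (PySem.List.pyRange 0 (j : Int) 1).foldl
        (fun og x => og.bind (fun g' => pvMergeStepA g' (k : Int) x))
        (some ((pvGA g k).set k (pvRA (g.getD k []) (pvSrc g k) 0)))
      = some ((pvGA g k).set k (pvRA (g.getD k []) (pvSrc g k) j)) := by
  intro j
  induction j with
  | zero =>
    intro _
    rw [show ((0 : Nat) : Int) = 0 by simp, PySem.List.pyRange_one_eq_nil (le_refl 0)]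
    rfl
  | succ n ih =>
    intro hle
    rw [show ((n + 1 : Nat) : Int) = (n : Int) + 1 by push_cast; ring,
      PySem.List.pyRange_one_succ_right (Int.natCast_nonneg n), List.foldl_append,
      ih (by omega), List.foldl_cons, List.foldl_nil, pvSomeBind]
    exact pvMergeStep_eval g k n hk (by omega) hS

lemma pvMerge_pvSrc (g : List (List String)) (k : Nat) (hk : k < g.length)
    (heq : g.length - 1 - k < k →
      (g.getD (g.length - 1 - k) []).length = (g.getD k []).length) :
    pvMerge (g.getD k []) (pvSrc g k) = pvMRow g k := by
  unfold pvSrc pvMRow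
  by_cases hm : g.length - 1 - k < k
  · rw [if_pos hm]
    rw [show g.length - 1 - (g.length - 1 - k) = k by omega]
    exact pvMerge_absorb _ _ (heq hm)
  · rw [if_neg hm]

lemma pvGA_succ (g : List (List String)) (k : Nat) (hk : k < g.length) :
    (pvGA g k).set k (pvMRow g k) = pvGA g (k + 1) := by
  apply List.ext_getElem (by simp [length_pvGA])
  intro i h1 h2
  rw [List.getElem_set]
  simp only [pvGA, List.getElem_map, List.getElem_range]
  by_cases hik : k = i
  · subst hik; rw [if_pos rfl, if_pos (by omega)]
  · rw [if_neg hik]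
    by_cases hlt : i < k
    · rw [if_pos hlt, if_pos (by omega)]
    · rw [if_neg hlt, if_neg (by omega)]

lemma pvYRowA_step (g : List (List String)) (k : Nat) (hk : k < g.length)
    (hle : (g.getD k []).length ≤ (g.getD (g.length - 1 - k) []).length)
    (heq : g.length - 1 - k < k →
      (g.getD (g.length - 1 - k) []).length = (g.getD k []).length) :
    pvYRowA (pvGA g k) (k : Int) = some (pvGA g (k + 1)) := by
  have hS : (g.getD k []).length ≤ (pvSrc g k).length := by
    unfold pvSrc
    by_cases hm : g.length - 1 - k < k
    · rw [if_pos hm, pvMRow, length_pvMerge,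
        show g.length - 1 - (g.length - 1 - k) = k by omega]
      have := heq hm; omega
    · rw [if_neg hm]; exact hle
  unfold pvYRowA
  have e0 : PySem.List.pyGet? (pvGA g k) (k : Int) = some (g.getD k []) := by
    rw [PySem.List.pyGet?_natCast,
      List.getElem?_eq_getElem (by rw [length_pvGA]; exact hk)]
    congr 1
    rw [← List.getD_eq_getElem (pvGA g k) [] (by rw [length_pvGA]; exact hk),
      getD_pvGA g k k hk, if_neg (lt_irrefl k)]
  rw [e0, pvSomeBind]
  have hG0 : pvGA g k = (pvGA g k).set k (pvRA (g.getD k []) (pvSrc g k) 0) := by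
    rw [pvRA_zero]
    have h1 : g.getD k [] = (pvGA g k).getD k [] := by
      rw [getD_pvGA g k k hk, if_neg (lt_irrefl k)]
    rw [h1, pvSetSelf (pvGA g k) k [] (by rw [length_pvGA]; exact hk)]
  calc (PySem.List.pyRange 0 ((g.getD k []).length : Int) 1).foldl
        (fun og x => og.bind (fun g' => pvMergeStepA g' (k : Int) x)) (some (pvGA g k))
      = some ((pvGA g k).set k (pvRA (g.getD k []) (pvSrc g k) (g.getD k []).length)) := by
        conv_lhs => rw [hG0]
        exact pvYRow_fold g k hk hS (g.getD k []).length (le_refl _)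
    _ = some (pvGA g (k + 1)) := by
        rw [pvRA_full _ _ hS, pvMerge_pvSrc g k hk heq, pvGA_succ g k hk]

lemma pvYLoopA_eval (g : List (List String)) (num : Int) (h0 : 0 ≤ num)
    (hH : num ≤ (g.length : Int))
    (hlen : ∀ y : Nat, y < num.toNat →
      (g.getD y []).length ≤ (g.getD (g.length - 1 - y) []).length) :
    pvYLoopA g num = some (pvGA g num.toNat) := by
  unfold pvYLoopA
  rw [show num = ((num.toNat : Nat) : Int) by omega]
  have main : ∀ k : Nat, k ≤ num.toNat →
      (PySem.List.pyRange 0 (k : Int) 1).foldl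
        (fun og y => og.bind (fun g' => pvYRowA g' y)) (some g) = some (pvGA g k) := by
    intro k
    induction k with
    | zero =>
      intro _
      rw [show ((0 : Nat) : Int) = 0 by simp, PySem.List.pyRange_one_eq_nil (le_refl 0)]
      simp [pvGA_zero]
    | succ n ih =>
      intro hle
      have hn : n < g.length := by omega
      rw [show ((n + 1 : Nat) : Int) = (n : Int) + 1 by push_cast; ring,
        PySem.List.pyRange_one_succ_right (Int.natCast_nonneg n), List.foldl_append,
        ih (by omega), List.foldl_cons, List.foldl_nil, pvSomeBind]
      apply pvYRowA_step g n hn (hlen n (by omega))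
      intro hm
      have h1 := hlen (g.length - 1 - n) (by omega)
      rw [show g.length - 1 - (g.length - 1 - n) = n by omega] at h1
      exact Nat.le_antisymm h1 (hlen n (by omega))
  exact main num.toNat (le_refl _)

lemma pvFoldA_y (g : List (List String)) (num : Int) (h0 : 0 ≤ num)
    (hH : num ≤ (g.length : Int))
    (hlen : ∀ y : Nat, y < num.toNat →
      (g.getD y []).length ≤ (g.getD (g.length - 1 - y) []).length) :
    pvFoldA g "y" num = some ((List.range num.toNat).map (pvMRow g)) := by
  unfold pvFoldA
  rw [if_pos rfl, pvYLoopA_eval g num h0 hH hlen, Option.map_some]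
  congr 1
  rw [PySem.List.slice_to _ h0]
  unfold pvGA
  rw [← List.map_take, List.take_range, show min num.toNat g.length = num.toNat by omega]
  apply List.map_congr_left
  intro i hi
  rw [if_pos (List.mem_range.mp hi)]
-- ---------- A's x-fold evaluates to the pure per-row mirror ----------

def pvXRowPure (row : List String) (n : Nat) : List String :=
  (List.range n).map (fun x =>
    if row.getD (row.length - 1 - x) "" = "#" then "#" else row.getD x "")

def pvRX (row : List String) (j : Nat) : List String :=
  (List.range row.length).map (fun x =>
    if x < j then (if row.getD (row.length - 1 - x) "" = "#" then "#" else row.getD x "")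
    else row.getD x "")

def pvGX (g : List (List String)) (n k : Nat) : List (List String) :=
  (List.range g.length).map (fun i => if i < k then pvXRowPure (g.getD i []) n else g.getD i [])

lemma pvRX_length (row : List String) (j : Nat) : (pvRX row j).length = row.length := by
  simp [pvRX]

lemma getD_pvRX (row : List String) (j x : Nat) (h : x < row.length) :
    (pvRX row j).getD x "" =
      if x < j then (if row.getD (row.length - 1 - x) "" = "#" then "#" else row.getD x "")
      else row.getD x "" :=
  PySem.List.getD_map_range _ _ _ _ h

lemma pvRX_zero (row : List String) : pvRX row 0 = row := by
  unfold pvRX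
  calc (List.range row.length).map (fun x =>
        if x < 0 then (if row.getD (row.length - 1 - x) "" = "#" then "#" else row.getD x "")
        else row.getD x "")
      = (List.range row.length).map (fun x => row.getD x "") := by
        apply List.map_congr_left; intro x _; simp
    _ = row := pvMapRangeGetD row ""

lemma pvRX_succ_set (row : List String) (j : Nat) (hj : j < row.length)
    (hmc : (if row.getD (row.length - 1 - j) "" = "#" then "#" else row.getD j "") = "#") :
    (pvRX row j).set j "#" = pvRX row (j + 1) := by
  apply List.ext_getElem (by simp [pvRX])
  intro i h1 h2
  have hi : i < row.length := by simpa [pvRX] using h2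
  rw [List.getElem_set]
  simp only [pvRX, List.getElem_map, List.getElem_range]
  by_cases hij : j = i
  · subst hij
    rw [if_pos rfl, if_pos (show j < j + 1 by omega), hmc]
  · rw [if_neg hij]
    exact if_congr (show i < j ↔ i < j + 1 by omega) rfl rfl

lemma pvRX_succ_keep (row : List String) (j : Nat)
    (hmc : ¬ row.getD (row.length - 1 - j) "" = "#") :
    pvRX row j = pvRX row (j + 1) := by
  apply List.ext_getElem (by simp [pvRX])
  intro i h1 h2
  simp only [pvRX, List.getElem_map, List.getElem_range]
  by_cases hij : i = j
  · rw [hij, if_neg (show ¬ j < j by omega), if_pos (show j < j + 1 by omega), if_neg hmc]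
  · exact if_congr (show i < j ↔ i < j + 1 by omega) rfl rfl

lemma pvXCell_eval (g : List (List String)) (y j : Nat)
    (hy : y < g.length) (hj : j < (g.getD y []).length) :
    pvXCellA (g.set y (pvRX (g.getD y []) j)) (y : Int) (j : Int)
      = some (g.set y (pvRX (g.getD y []) (j + 1))) := by
  set row := g.getD y [] with hrow
  set G := g.set y (pvRX row j) with hG
  have hGlen : G.length = g.length := by simp [hG]
  have e0 : PySem.List.pyGet? G (y : Int) = some (pvRX row j) := by
    rw [PySem.List.pyGet?_natCast, List.getElem?_eq_getElem (by omega : y < G.length)]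
    congr 1
    simp only [hG, List.getElem_set]
    rw [if_true]
  simp only [pvXCellA]
  rw [e0, pvSomeBind]
  have hLrow : (pvRX row j).length = row.length := pvRX_length row j
  have hm : row.length - 1 - j < row.length := by omega
  have e1 : PySem.List.pyGet? (pvRX row j) (((pvRX row j).length : Int) - (j : Int) - 1)
      = some ((pvRX row j).getD (row.length - 1 - j) "") := by
    rw [show (((pvRX row j).length : Int) - (j : Int) - 1)
        = ((row.length - 1 - j : Nat) : Int) by rw [hLrow]; omega,
      PySem.List.pyGet?_natCast,
      List.getElem?_eq_getElem (by rw [hLrow]; exact hm),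
      List.getD_eq_getElem _ "" (by rw [hLrow]; exact hm)]
  rw [e1, pvSomeBind]
  have hval : (pvRX row j).getD (row.length - 1 - j) "" =
      (if row.length - 1 - j < j
        then (if row.getD (row.length - 1 - (row.length - 1 - j)) "" = "#" then "#"
              else row.getD (row.length - 1 - j) "")
        else row.getD (row.length - 1 - j) "") := getD_pvRX row j _ hm
  by_cases hv : (pvRX row j).getD (row.length - 1 - j) "" = "#"
  · rw [if_pos hv]
    have hmc : (if row.getD (row.length - 1 - j) "" = "#" then "#" else row.getD j "") = "#" := by
      rw [hval] at hv
      by_cases hlt : row.length - 1 - j < j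
      · rw [if_pos hlt, show row.length - 1 - (row.length - 1 - j) = j by omega] at hv
        by_cases h1 : row.getD j "" = "#"
        · split_ifs with h2
          · rfl
          · exact h1
        · rw [if_neg h1] at hv
          rw [if_pos hv]
      · rw [if_neg hlt] at hv
        rw [if_pos hv]
    have e2 : PySem.List.pySet? (pvRX row j) (j : Int) "#" = some ((pvRX row j).set j "#") :=
      PySem.List.pySet?_natCast _ _ _ (by rw [hLrow]; exact hj)
    rw [e2, pvSomeBind,
      PySem.List.pySet?_natCast _ _ _ (by omega : y < G.length), hG, List.set_set,
      pvRX_succ_set row j hj hmc]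
  · rw [if_neg hv]
    have hmc : ¬ row.getD (row.length - 1 - j) "" = "#" := by
      intro hcontra
      apply hv
      rw [hval]
      by_cases hlt : row.length - 1 - j < j
      · rw [if_pos hlt, show row.length - 1 - (row.length - 1 - j) = j by omega]
        split_ifs with h1
        · rfl
        · exact hcontra
      · rw [if_neg hlt]
        exact hcontra
    rw [hG, pvRX_succ_keep row j hmc]

lemma pvXRowA_eval (g : List (List String)) (y : Nat) (num : Int)
    (hy : y < g.length) (h0 : 0 ≤ num) (hn : num.toNat ≤ (g.getD y []).length) :
    pvXRowA g (y : Int) num = some (g.set y (pvXRowPure (g.getD y []) num.toNat)) := by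
  unfold pvXRowA
  have main : ∀ j : Nat, j ≤ num.toNat →
      (PySem.List.pyRange 0 (j : Int) 1).foldl
        (fun og x => og.bind (fun g' => pvXCellA g' (y : Int) x)) (some g)
      = some (g.set y (pvRX (g.getD y []) j)) := by
    intro j
    induction j with
    | zero =>
      intro _
      rw [show ((0 : Nat) : Int) = 0 by simp, PySem.List.pyRange_one_eq_nil (le_refl 0),
        List.foldl_nil, pvRX_zero, pvSetSelf g y [] hy]
    | succ n ih =>
      intro hle
      rw [show ((n + 1 : Nat) : Int) = (n : Int) + 1 by push_cast; ring,
        PySem.List.pyRange_one_succ_right (Int.natCast_nonneg n), List.foldl_append,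
        ih (by omega), List.foldl_cons, List.foldl_nil, pvSomeBind]
      exact pvXCell_eval g y n hy (by omega)
  rw [show PySem.List.pyRange 0 num 1 = PySem.List.pyRange 0 ((num.toNat : Nat) : Int) 1
      by rw [Int.toNat_of_nonneg h0],
    main num.toNat (le_refl _), pvSomeBind]
  have e0 : PySem.List.pyGet? (g.set y (pvRX (g.getD y []) num.toNat)) (y : Int)
      = some (pvRX (g.getD y []) num.toNat) := by
    rw [PySem.List.pyGet?_natCast, List.getElem?_eq_getElem (by simpa using hy)]
    congr 1
    simp only [List.getElem_set]
    rw [if_true]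
  rw [e0, pvSomeBind]
  have etrim : PySem.List.slice (pvRX (g.getD y []) num.toNat) none (some num)
      = pvXRowPure (g.getD y []) num.toNat := by
    rw [PySem.List.slice_to _ h0]
    unfold pvRX pvXRowPure
    rw [← List.map_take, List.take_range, show min num.toNat (g.getD y []).length = num.toNat by omega]
    apply List.map_congr_left
    intro x hx
    rw [if_pos (List.mem_range.mp hx)]
  rw [etrim, PySem.List.pySet?_natCast _ _ _ (by simpa using hy), List.set_set]

lemma length_pvGX (g : List (List String)) (n k : Nat) : (pvGX g n k).length = g.length := by
  simp [pvGX]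

lemma getD_pvGX (g : List (List String)) (n k i : Nat) (h : i < g.length) :
    (pvGX g n k).getD i [] = if i < k then pvXRowPure (g.getD i []) n else g.getD i [] :=
  PySem.List.getD_map_range _ _ _ _ h

lemma pvGX_zero (g : List (List String)) (n : Nat) : pvGX g n 0 = g := by
  unfold pvGX
  calc (List.range g.length).map (fun i =>
        if i < 0 then pvXRowPure (g.getD i []) n else g.getD i [])
      = (List.range g.length).map (fun i => g.getD i []) := by
        apply List.map_congr_left; intro i _; simp
    _ = g := pvMapRangeGetD g []

lemma pvGX_succ (g : List (List String)) (n k : Nat) (hk : k < g.length) :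
    (pvGX g n k).set k (pvXRowPure (g.getD k []) n) = pvGX g n (k + 1) := by
  apply List.ext_getElem (by simp [length_pvGX])
  intro i h1 h2
  rw [List.getElem_set]
  simp only [pvGX, List.getElem_map, List.getElem_range]
  by_cases hik : k = i
  · subst hik; rw [if_pos rfl, if_pos (by omega)]
  · rw [if_neg hik]
    by_cases hlt : i < k
    · rw [if_pos hlt, if_pos (by omega)]
    · rw [if_neg hlt, if_neg (by omega)]

lemma pvXLoopA_eval (g : List (List String)) (num : Int) (h0 : 0 ≤ num)
    (hn : ∀ i : Nat, i < g.length → num ≤ ((g.getD i []).length : Int)) :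
    pvXLoopA g num = some (pvGX g num.toNat g.length) := by
  unfold pvXLoopA
  have main : ∀ k : Nat, k ≤ g.length →
      (PySem.List.pyRange 0 (k : Int) 1).foldl
        (fun og y => og.bind (fun g' => pvXRowA g' y num)) (some g)
      = some (pvGX g num.toNat k) := by
    intro k
    induction k with
    | zero =>
      intro _
      rw [show ((0 : Nat) : Int) = 0 by simp, PySem.List.pyRange_one_eq_nil (le_refl 0),
        List.foldl_nil, pvGX_zero]
    | succ n ih =>
      intro hle
      have hnlt : n < g.length := by omega
      rw [show ((n + 1 : Nat) : Int) = (n : Int) + 1 by push_cast; ring,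
        PySem.List.pyRange_one_succ_right (Int.natCast_nonneg n), List.foldl_append,
        ih (by omega), List.foldl_cons, List.foldl_nil, pvSomeBind]
      have hrec := pvXRowA_eval (pvGX g num.toNat n) n num
        (by rw [length_pvGX]; exact hnlt) h0
        (by rw [getD_pvGX g num.toNat n n hnlt, if_neg (lt_irrefl n)]
            have := hn n hnlt; omega)
      rw [hrec]
      congr 1
      rw [getD_pvGX g num.toNat n n hnlt, if_neg (lt_irrefl n)]
      exact pvGX_succ g num.toNat n hnlt
  have := main g.length (le_refl _)
  exact this

lemma pvFoldA_x (g : List (List String)) (num : Int)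
    (hne : g ≠ []) (h2n : ((g.headD []).length : Int) = 2 * num)
    (hn : ∀ i : Nat, i < g.length → num ≤ ((g.getD i []).length : Int)) :
    pvFoldA g "x" num = some (pvGX g num.toNat g.length) := by
  have h0 : 0 ≤ num := by omega
  unfold pvFoldA
  rw [if_neg (by decide), if_pos rfl]
  cases g with
  | nil => exact absurd rfl hne
  | cons r t =>
    have e0 : PySem.List.pyGet? (r :: t) (0 : Int) = some r := by
      rw [show (0 : Int) = ((0 : Nat) : Int) by simp, PySem.List.pyGet?_natCast]
      rfl
    rw [e0, pvSomeBind, if_pos (by simpa using h2n)]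
    exact pvXLoopA_eval (r :: t) num h0 hn
-- ---------- counting '#' cells = number of coordinate points ----------

lemma pvInnerCount (row : List String) (a : Int) :
    row.foldl (fun r col => r + if col = "#" then 1 else 0) a
      = a + (row.countP (fun c => decide (c = "#")) : Int) := by
  have hfun : (fun (r : Int) (col : String) => r + if col = "#" then 1 else 0)
      = (fun (r : Int) (col : String) =>
          if (fun c => decide (c = "#")) col = true then r + 1 else r) := by
    funext r c
    by_cases h : c = "#" <;> simp [h]
  rw [hfun, PySem.List.foldl_count_if]

lemma pvOuterCount (g : List (List String)) (a : Int) :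
    g.foldl (fun result row =>
        row.foldl (fun r col => r + if col = "#" then 1 else 0) result) a
      = a + ((g.map (fun row => row.countP (fun c => decide (c = "#")))).sum : Nat) := by
  induction g generalizing a with
  | nil => simp
  | cons row rows ih =>
    rw [List.foldl_cons, ih, pvInnerCount, List.map_cons, List.sum_cons]
    push_cast
    ring

lemma pvLenInner (row : List String) (s t : Int) :
    ((PySem.List.enumerate row s).filterMap (fun xc =>
        if xc.2 = "#" then some (xc.1, t) else none)).length
      = row.countP (fun c => decide (c = "#")) := by
  induction row generalizing s with
  | nil => simp [PySem.List.enumerate_nil]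
  | cons c cs ih =>
    rw [PySem.List.enumerate_cons, List.filterMap_cons]
    by_cases h : c = "#" <;> simp [h, ih (s + 1)]

lemma pvLen_pointsB (g : List (List String)) :
    (pvPointsB g).length
      = (g.map (fun row => row.countP (fun c => decide (c = "#")))).sum := by
  unfold pvPointsB
  rw [List.length_flatMap]
  have h1 : (PySem.List.enumerate g 0).map (fun yr =>
        ((PySem.List.enumerate yr.2 0).filterMap (fun xc =>
          if xc.2 = "#" then some (xc.1, yr.1) else none)).length)
      = (PySem.List.enumerate g 0).map (fun yr =>
          yr.2.countP (fun c => decide (c = "#"))) :=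
    List.map_congr_left (fun yr _ => pvLenInner yr.2 0 yr.1)
  rw [h1]
  rw [show (fun (yr : Int × List String) => yr.2.countP (fun c => decide (c = "#")))
      = (fun row => row.countP (fun c => decide (c = "#"))) ∘ (fun (yr : Int × List String) => yr.2)
    from rfl]
  rw [← List.map_map, PySem.List.map_snd_enumerate]

lemma pvCount_eq (g : List (List String)) :
    (g.foldl (fun result row =>
        row.foldl (fun r col => r + if col = "#" then 1 else 0) result) 0 : Int)
      = ((pvPointsB g).length : Int) := by
  rw [pvOuterCount, pvLen_pointsB, zero_add]

-- ---------- membership and distinctness of the point list ----------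

def pvPred (g : List (List String)) (p : Int × Int) : Prop :=
  0 ≤ p.2 ∧ p.2 < (g.length : Int) ∧ 0 ≤ p.1 ∧
    p.1 < ((g.getD p.2.toNat []).length : Int) ∧
    (g.getD p.2.toNat []).getD p.1.toNat "" = "#"

lemma mem_pvPointsB (g : List (List String)) (p : Int × Int) :
    p ∈ pvPointsB g ↔ pvPred g p := by
  unfold pvPointsB pvPred
  rw [List.mem_flatMap]
  constructor
  · rintro ⟨yr, hyr, hp⟩
    rw [PySem.List.mem_enumerate_iff] at hyr
    obtain ⟨k, hk, rfl⟩ := hyr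
    rw [List.mem_filterMap] at hp
    obtain ⟨xc, hxc, heq⟩ := hp
    rw [PySem.List.mem_enumerate_iff] at hxc
    obtain ⟨x, hx, rfl⟩ := hxc
    by_cases hc : (g[k])[x] = "#"
    · rw [if_pos hc] at heq
      obtain rfl := (Option.some.inj heq)
      refine ⟨by simp, by simp; exact_mod_cast hk, by simp, ?_, ?_⟩
      · rw [show ((0 : Int) + (k : Int)).toNat = k by omega, List.getD_eq_getElem g [] hk]
        simp
        exact_mod_cast hx
      · rw [show ((0 : Int) + (k : Int)).toNat = k by omega,
          show ((0 : Int) + (x : Int)).toNat = x by omega,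
          List.getD_eq_getElem g [] hk, List.getD_eq_getElem _ "" hx]
        exact hc
    · rw [if_neg hc] at heq
      exact absurd heq (by simp)
  · rintro ⟨h1, h2, h3, h4, h5⟩
    have hk : p.2.toNat < g.length := by omega
    have hx : p.1.toNat < (g.getD p.2.toNat []).length := by omega
    refine ⟨(p.2, g.getD p.2.toNat []), ?_, ?_⟩
    · rw [PySem.List.mem_enumerate_iff]
      exact ⟨p.2.toNat, hk, by
        rw [Prod.mk.injEq]
        exact ⟨by omega, by rw [List.getD_eq_getElem g [] hk]⟩⟩
    · rw [List.mem_filterMap]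
      refine ⟨(p.1, (g.getD p.2.toNat []).getD p.1.toNat ""), ?_, ?_⟩
      · rw [PySem.List.mem_enumerate_iff]
        exact ⟨p.1.toNat, hx, by
          rw [Prod.mk.injEq]
          exact ⟨by omega, by rw [List.getD_eq_getElem _ "" hx]⟩⟩
      · rw [if_pos h5]

lemma pvNodupInner (row : List String) (s t : Int) :
    (((PySem.List.enumerate row s).filterMap (fun xc =>
        if xc.2 = "#" then some (xc.1, t) else none))).Nodup
    ∧ (∀ q ∈ ((PySem.List.enumerate row s).filterMap (fun xc =>
        if xc.2 = "#" then some (xc.1, t) else none)), s ≤ q.1 ∧ q.2 = t) := by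
  induction row generalizing s with
  | nil => simp [PySem.List.enumerate_nil]
  | cons c cs ih =>
    rw [PySem.List.enumerate_cons, List.filterMap_cons]
    obtain ⟨ihn, ihb⟩ := ih (s + 1)
    by_cases h : c = "#"
    · simp only [h, if_pos]
      constructor
      · rw [List.nodup_cons]
        refine ⟨fun hmem => ?_, ihn⟩
        have := (ihb _ hmem).1
        simp only at this
        omega
      · intro q hq
        rcases List.mem_cons.mp hq with rfl | hq2
        · exact ⟨le_refl s, rfl⟩
        · exact ⟨by have := (ihb q hq2).1; omega, (ihb q hq2).2⟩
    · simp only [h, if_false]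
      exact ⟨ihn, fun q hq => ⟨by have := (ihb q hq).1; omega, (ihb q hq).2⟩⟩

lemma pvNodupPointsAux (g : List (List String)) : ∀ s : Int,
    ((PySem.List.enumerate g s).flatMap (fun yr =>
      (PySem.List.enumerate yr.2 0).filterMap (fun xc =>
        if xc.2 = "#" then some (xc.1, yr.1) else none))).Nodup
    ∧ ∀ q ∈ ((PySem.List.enumerate g s).flatMap (fun yr =>
      (PySem.List.enumerate yr.2 0).filterMap (fun xc =>
        if xc.2 = "#" then some (xc.1, yr.1) else none))), s ≤ q.2 := by
  induction g with
  | nil => intro s; simp [PySem.List.enumerate_nil]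
  | cons row rows ih =>
    intro s
    rw [PySem.List.enumerate_cons, List.flatMap_cons]
    obtain ⟨hn1, hb1⟩ := pvNodupInner row 0 s
    obtain ⟨hn2, hb2⟩ := ih (s + 1)
    constructor
    · rw [List.nodup_append]
      refine ⟨hn1, hn2, fun a ha b hb => ?_⟩
      intro heq
      have e1 := (hb1 a ha).2
      have e2 := hb2 b hb
      rw [heq] at e1
      omega
    · intro q hq
      rcases List.mem_append.mp hq with h | h
      · rw [(hb1 q h).2]
      · have := hb2 q h; omega

lemma pvNodupPointsB (g : List (List String)) : (pvPointsB g).Nodup :=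
  (pvNodupPointsAux g 0).1

lemma pvPts0 (g : List (List String)) :
    PySem.Set.ofList (pvPointsB g) = pvPointsB g :=
  PySem.Set.ofList_eq_self_of_nodup _ (pvNodupPointsB g)

lemma pvLengthEq {α : Type} [DecidableEq α] (l₁ l₂ : List α) (h₁ : l₁.Nodup) (h₂ : l₂.Nodup)
    (h : ∀ a, a ∈ l₁ ↔ a ∈ l₂) : l₁.length = l₂.length :=
  ((List.perm_ext_iff_of_nodup h₁ h₂).mpr h).length_eq

-- ---------- rectangularity ----------

lemma pvLenRow (g : List (List String)) (W : Int)
    (hrect : ∀ row ∈ g, (row.length : Int) = W) (i : Nat) (hi : i < g.length) :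
    ((g.getD i []).length : Int) = W := by
  apply hrect
  rw [List.getD_eq_getElem g [] hi]
  exact List.getElem_mem hi

lemma pvRect_y (g : List (List String)) (W num : Int)
    (hrect : ∀ row ∈ g, (row.length : Int) = W) (hH : num ≤ (g.length : Int)) :
    ∀ row ∈ (List.range num.toNat).map (pvMRow g), (row.length : Int) = W := by
  intro row hr
  rw [List.mem_map] at hr
  obtain ⟨i, hi, rfl⟩ := hr
  rw [List.mem_range] at hi
  have h1 := pvLenRow g W hrect i (by omega)
  have h2 := pvLenRow g W hrect (g.length - 1 - i) (by omega)
  rw [pvMRow, length_pvMerge]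
  push_cast
  omega

lemma pvRect_x (g : List (List String)) (num : Int) (h0 : 0 ≤ num) :
    ∀ row ∈ pvGX g num.toNat g.length, (row.length : Int) = num := by
  intro row hr
  unfold pvGX at hr
  rw [List.mem_map] at hr
  obtain ⟨i, hi, rfl⟩ := hr
  rw [List.mem_range] at hi
  rw [if_pos hi]
  unfold pvXRowPure
  rw [List.length_map, List.length_range]
  omega

-- ---------- B's set folds have exactly the folded grid's points ----------

lemma pvMem_yFold (g : List (List String)) (W : Int) (pts : List (Int × Int)) (num : Int)
    (hrect : ∀ row ∈ g, (row.length : Int) = W)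
    (hpts : ∀ q, q ∈ pts ↔ q ∈ pvPointsB g)
    (h0 : 0 ≤ num) (hH : num ≤ (g.length : Int)) (p : Int × Int) :
    p ∈ pvYFoldB pts (g.length : Int) num
      ↔ p ∈ pvPointsB ((List.range num.toNat).map (pvMRow g)) := by
  have hmrowlen : ∀ y : Nat, y < num.toNat →
      (pvMRow g y).length = (g.getD y []).length := by
    intro y hy
    have h1 := pvLenRow g W hrect y (by omega)
    have h2 := pvLenRow g W hrect (g.length - 1 - y) (by omega)
    rw [pvMRow, length_pvMerge]
    omega
  have hlen : ∀ y : Nat, y < num.toNat →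
      (g.getD y []).length ≤ (g.getD (g.length - 1 - y) []).length := by
    intro y hy
    have h1 := pvLenRow g W hrect y (by omega)
    have h2 := pvLenRow g W hrect (g.length - 1 - y) (by omega)
    omega
  rw [mem_pvPointsB]
  have hRHS : pvPred ((List.range num.toNat).map (pvMRow g)) p ↔
      (0 ≤ p.2 ∧ p.2 < num ∧ 0 ≤ p.1 ∧ p.1 < ((g.getD p.2.toNat []).length : Int) ∧
        (pvMRow g p.2.toNat).getD p.1.toNat "" = "#") := by
    unfold pvPred
    rw [List.length_map, List.length_range]
    constructor
    · rintro ⟨h1, h2, h3, h4, h5⟩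
      have hy : p.2.toNat < num.toNat := by omega
      rw [PySem.List.getD_map_range _ _ _ _ hy] at h4 h5
      rw [hmrowlen _ hy] at h4
      exact ⟨h1, by omega, h3, h4, h5⟩
    · rintro ⟨h1, h2, h3, h4, h5⟩
      have hy : p.2.toNat < num.toNat := by omega
      refine ⟨h1, by omega, h3, ?_, ?_⟩ <;>
        rw [PySem.List.getD_map_range _ _ _ _ hy]
      · rw [hmrowlen _ hy]; exact h4
      · exact h5
  rw [hRHS]
  unfold pvYFoldB
  rw [PySem.Set.mem_union, PySem.Set.mem_ofList, PySem.Set.mem_ofList, List.mem_filter,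
    List.mem_filterMap]
  simp only [decide_eq_true_eq]
  constructor
  · rintro (⟨hp, hkeep⟩ | ⟨q, hq, hfm⟩)
    · rw [hpts, mem_pvPointsB] at hp
      obtain ⟨h1, h2, h3, h4, h5⟩ := hp
      refine ⟨h1, hkeep, h3, h4, ?_⟩
      rw [pvMRow, getD_pvMerge _ _ _ (by omega) (hlen p.2.toNat (by omega))]
      split_ifs with hbr
      · rfl
      · exact h5
    · by_cases hc : (g.length : Int) - 1 - q.2 < num
      · rw [if_pos hc] at hfm
        obtain rfl := Option.some.inj hfm
        rw [hpts, mem_pvPointsB] at hq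
        obtain ⟨k1, k2, k3, k4, k5⟩ := hq
        have hq2 : q.2.toNat < g.length := by omega
        have hmn : g.length - 1 - q.2.toNat < g.length := by omega
        have hw1 := pvLenRow g W hrect q.2.toNat hq2
        have hw2 := pvLenRow g W hrect (g.length - 1 - q.2.toNat) hmn
        refine ⟨by dsimp only; omega, by dsimp only; omega, k3, ?_, ?_⟩
        · dsimp only
          rw [show ((g.length : Int) - 1 - q.2).toNat = g.length - 1 - q.2.toNat by omega]
          omega
        · dsimp only
          rw [show ((g.length : Int) - 1 - q.2).toNat = g.length - 1 - q.2.toNat by omega]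
          rw [pvMRow, getD_pvMerge _ _ _ (by omega)
            (hlen (g.length - 1 - q.2.toNat) (by omega))]
          rw [show g.length - 1 - (g.length - 1 - q.2.toNat) = q.2.toNat by omega]
          rw [if_pos k5]
      · rw [if_neg hc] at hfm
        exact absurd hfm (by simp)
  · rintro ⟨h1, h2, h3, h4, h5⟩
    have hy : p.2.toNat < num.toNat := by omega
    have hyH : p.2.toNat < g.length := by omega
    rw [pvMRow, getD_pvMerge _ _ _ (by omega) (hlen p.2.toNat hy)] at h5
    by_cases hown : (g.getD p.2.toNat []).getD p.1.toNat "" = "#"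
    · left
      exact ⟨(hpts p).mpr ((mem_pvPointsB g p).mpr ⟨h1, by omega, h3, h4, hown⟩), h2⟩
    · right
      have hmir : (g.getD (g.length - 1 - p.2.toNat) []).getD p.1.toNat "" = "#" := by
        by_cases hm : (g.getD (g.length - 1 - p.2.toNat) []).getD p.1.toNat "" = "#"
        · exact hm
        · rw [if_neg hm] at h5
          exact absurd h5 hown
      have hw1 := pvLenRow g W hrect p.2.toNat hyH
      have hw2 := pvLenRow g W hrect (g.length - 1 - p.2.toNat) (by omega)
      refine ⟨(p.1, (g.length : Int) - 1 - p.2), ?_, ?_⟩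
      · apply (hpts _).mpr
        apply (mem_pvPointsB g _).mpr
        refine ⟨by dsimp only; omega, by dsimp only; omega, h3, ?_, ?_⟩
        · dsimp only
          rw [show ((g.length : Int) - 1 - p.2).toNat = g.length - 1 - p.2.toNat by omega]
          omega
        · dsimp only
          rw [show ((g.length : Int) - 1 - p.2).toNat = g.length - 1 - p.2.toNat by omega]
          exact hmir
      · dsimp only
        rw [show (g.length : Int) - 1 - ((g.length : Int) - 1 - p.2) = p.2 by omega]
        rw [if_pos h2, Prod.mk.eta]

lemma pvMem_xFold (g : List (List String)) (W : Int) (pts : List (Int × Int)) (num : Int)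
    (hrect : ∀ row ∈ g, (row.length : Int) = W)
    (hpts : ∀ q, q ∈ pts ↔ q ∈ pvPointsB g)
    (h0 : 0 ≤ num)
    (hn : ∀ i : Nat, i < g.length → num ≤ ((g.getD i []).length : Int))
    (p : Int × Int) :
    p ∈ pvXFoldB pts W num ↔ p ∈ pvPointsB (pvGX g num.toNat g.length) := by
  rw [mem_pvPointsB]
  have hRHS : pvPred (pvGX g num.toNat g.length) p ↔
      (0 ≤ p.2 ∧ p.2 < (g.length : Int) ∧ 0 ≤ p.1 ∧ p.1 < num ∧
        (if (g.getD p.2.toNat []).getD ((g.getD p.2.toNat []).length - 1 - p.1.toNat) "" = "#"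
          then "#" else (g.getD p.2.toNat []).getD p.1.toNat "") = "#") := by
    unfold pvPred
    rw [length_pvGX]
    constructor
    · rintro ⟨h1, h2, h3, h4, h5⟩
      have hy : p.2.toNat < g.length := by omega
      rw [getD_pvGX g num.toNat g.length p.2.toNat hy, if_pos hy] at h4 h5
      rw [pvXRowPure, List.length_map, List.length_range] at h4
      have hx : p.1.toNat < num.toNat := by omega
      rw [pvXRowPure, PySem.List.getD_map_range _ _ _ _ hx] at h5
      exact ⟨h1, h2, h3, by omega, h5⟩
    · rintro ⟨h1, h2, h3, h4, h5⟩
      have hy : p.2.toNat < g.length := by omega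
      have hx : p.1.toNat < num.toNat := by omega
      refine ⟨h1, h2, h3, ?_, ?_⟩ <;>
        rw [getD_pvGX g num.toNat g.length p.2.toNat hy, if_pos hy]
      · rw [pvXRowPure, List.length_map, List.length_range]; omega
      · rw [pvXRowPure, PySem.List.getD_map_range _ _ _ _ hx]; exact h5
  rw [hRHS]
  unfold pvXFoldB
  rw [PySem.Set.mem_union, PySem.Set.mem_ofList, PySem.Set.mem_ofList, List.mem_filter,
    List.mem_filterMap]
  simp only [decide_eq_true_eq]
  constructor
  · rintro (⟨hp, hkeep⟩ | ⟨q, hq, hfm⟩)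
    · rw [hpts, mem_pvPointsB] at hp
      obtain ⟨h1, h2, h3, h4, h5⟩ := hp
      refine ⟨h1, h2, h3, hkeep, ?_⟩
      split_ifs with hbr
      · rfl
      · exact h5
    · rw [hpts, mem_pvPointsB] at hq
      obtain ⟨k1, k2, k3, k4, k5⟩ := hq
      have hq2 : q.2.toNat < g.length := by omega
      have hLW := pvLenRow g W hrect q.2.toNat hq2
      by_cases hc : W - 1 - q.1 < num
      · rw [if_pos hc] at hfm
        obtain rfl := Option.some.inj hfm
        refine ⟨by dsimp only; omega, by dsimp only; omega, by dsimp only; omega,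
          by dsimp only; omega, ?_⟩
        dsimp only
        rw [show (W - 1 - q.1).toNat
            = (g.getD q.2.toNat []).length - 1 - q.1.toNat by omega]
        rw [show (g.getD q.2.toNat []).length - 1 -
            ((g.getD q.2.toNat []).length - 1 - q.1.toNat) = q.1.toNat by omega]
        rw [if_pos k5]
      · rw [if_neg hc] at hfm
        exact absurd hfm (by simp)
  · rintro ⟨h1, h2, h3, h4, h5⟩
    have hy : p.2.toNat < g.length := by omega
    have hL : num ≤ ((g.getD p.2.toNat []).length : Int) := hn p.2.toNat hy
    have hLW := pvLenRow g W hrect p.2.toNat hy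
    by_cases hown : (g.getD p.2.toNat []).getD p.1.toNat "" = "#"
    · left
      exact ⟨(hpts p).mpr ((mem_pvPointsB g p).mpr ⟨h1, h2, h3, by omega, hown⟩), h4⟩
    · right
      have hmir : (g.getD p.2.toNat []).getD
          ((g.getD p.2.toNat []).length - 1 - p.1.toNat) "" = "#" := by
        by_cases hm : (g.getD p.2.toNat []).getD
            ((g.getD p.2.toNat []).length - 1 - p.1.toNat) "" = "#"
        · exact hm
        · rw [if_neg hm] at h5
          exact absurd h5 hown
      refine ⟨(W - 1 - p.1, p.2), ?_, ?_⟩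
      · apply (hpts _).mpr
        apply (mem_pvPointsB g _).mpr
        refine ⟨by dsimp only; exact h1, by dsimp only; exact h2, by dsimp only; omega,
          ?_, ?_⟩
        · dsimp only
          omega
        · dsimp only
          rw [show (W - 1 - p.1).toNat
              = (g.getD p.2.toNat []).length - 1 - p.1.toNat by omega]
          exact hmir
      · dsimp only
        rw [show W - 1 - (W - 1 - p.1) = p.1 by omega, if_pos h4, Prod.mk.eta]

-- ---------- the main loop invariant ----------

lemma pvMain (fs : List String) : ∀ (g : List (List String)) (W : Int)
    (pts : List (Int × Int)) (be : Bool),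
    (∀ row ∈ g, (row.length : Int) = W) → pts.Nodup →
    (∀ q, q ∈ pts ↔ q ∈ pvPointsB g) →
    pvFoldsOK (g.length : Int) W fs be = true →
    ∃ g' pts', pvLoopA g fs be = some g' ∧
      pvLoopB pts (g.length : Int) W fs be = some pts' ∧
      pts'.Nodup ∧ (∀ q, q ∈ pts' ↔ q ∈ pvPointsB g') := by
  induction fs with
  | nil =>
    intro g W pts be hrect hnd hmem _
    exact ⟨g, pts, rfl, rfl, hnd, hmem⟩
  | cons f rest ih =>
    intro g W pts be hrect hnd hmem hok
    unfold pvFoldsOK at hok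
    cases hsp : PySem.Str.split? f "=" with
    | none => rw [hsp] at hok; simp at hok
    | some parts =>
      rw [hsp] at hok
      rcases parts with _ | ⟨axis, _ | ⟨s, _ | ⟨c3, tail⟩⟩⟩
      · simp at hok
      · simp at hok
      · dsimp only at hok
        cases hint : PySem.Int.ofStr? s with
        | none => rw [hint] at hok; simp at hok
        | some num =>
          rw [hint] at hok
          dsimp only at hok
          by_cases hay : axis = "y"
          · subst hay
            rw [if_pos rfl] at hok
            simp only [Bool.and_eq_true, Bool.or_eq_true, decide_eq_true_eq] at hok
            obtain ⟨⟨h0, hH⟩, hrest⟩ := hok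
            have hlen : ∀ y : Nat, y < num.toNat →
                (g.getD y []).length ≤ (g.getD (g.length - 1 - y) []).length := by
              intro y hy
              have h1 := pvLenRow g W hrect y (by omega)
              have h2 := pvLenRow g W hrect (g.length - 1 - y) (by omega)
              omega
            have hA2 := pvFoldA_y g num h0 hH hlen
            have hmem₂ := pvMem_yFold g W pts num hrect hmem h0 hH
            have hnd₂ : (pvYFoldB pts (g.length : Int) num).Nodup :=
              PySem.Set.nodup_union _ _ (PySem.Set.nodup_ofList _)
            have hrect₂ := pvRect_y g W num hrect hH
            have hlen₂ : ((((List.range num.toNat).map (pvMRow g)).length : Nat) : Int)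
                = num := by
              rw [List.length_map, List.length_range]; omega
            cases be with
            | true =>
              refine ⟨(List.range num.toNat).map (pvMRow g),
                pvYFoldB pts (g.length : Int) num, ?_, ?_, hnd₂, hmem₂⟩
              · simp only [pvLoopA, hsp, hint, pvSomeBind]
                rw [hA2, pvSomeBind, if_pos trivial]
              · simp only [pvLoopB, hsp, hint, pvSomeBind]
                rw [if_pos trivial, if_pos trivial]
            | false =>
              rcases hrest with hfalse | hrest
              · exact absurd hfalse (by simp)
              rw [← hlen₂] at hrest
              obtain ⟨g', pts', hA', hB', hnd', hmem'⟩ :=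
                ih ((List.range num.toNat).map (pvMRow g)) W
                  (pvYFoldB pts (g.length : Int) num) false hrect₂ hnd₂ hmem₂ hrest
              refine ⟨g', pts', ?_, ?_, hnd', hmem'⟩
              · simp only [pvLoopA, hsp, hint, pvSomeBind]
                rw [hA2, pvSomeBind, if_neg (by simp)]
                exact hA'
              · simp only [pvLoopB, hsp, hint, pvSomeBind]
                rw [if_pos trivial, if_neg (by simp)]
                rw [hlen₂] at hB'
                exact hB'
          · rw [if_neg hay] at hok
            by_cases hax : axis = "x"
            · subst hax
              rw [if_pos rfl] at hok
              simp only [Bool.and_eq_true, Bool.or_eq_true, decide_eq_true_eq] at hok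
              obtain ⟨⟨hH1, hWn⟩, hrest⟩ := hok
              have hne : g ≠ [] := by
                intro hnil; subst hnil; simp at hH1
              have hW0 : ((g.headD []).length : Int) = W := by
                cases g with
                | nil => exact absurd rfl hne
                | cons r t => exact hrect r (List.mem_cons_self)
              have h0 : 0 ≤ num := by omega
              have hn : ∀ i : Nat, i < g.length → num ≤ ((g.getD i []).length : Int) := by
                intro i hi
                have := pvLenRow g W hrect i hi
                omega
              have hA2 := pvFoldA_x g num hne (by omega) hn
              have hmem₂ := pvMem_xFold g W pts num hrect hmem h0 hn
              have hnd₂ : (pvXFoldB pts W num).Nodup :=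
                PySem.Set.nodup_union _ _ (PySem.Set.nodup_ofList _)
              have hrect₂ := pvRect_x g num h0
              have hglen₂ : (((pvGX g num.toNat g.length).length : Nat) : Int)
                  = (g.length : Int) := by
                rw [length_pvGX]
              cases be with
              | true =>
                refine ⟨pvGX g num.toNat g.length, pvXFoldB pts W num, ?_, ?_, hnd₂, hmem₂⟩
                · simp only [pvLoopA, hsp, hint, pvSomeBind]
                  rw [hA2, pvSomeBind, if_pos trivial]
                · simp only [pvLoopB, hsp, hint, pvSomeBind]
                  rw [if_neg (by decide : ¬ ("x" : String) = "y"), if_pos trivial,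
                    if_pos hWn, if_pos trivial]
              | false =>
                rcases hrest with hfalse | hrest
                · exact absurd hfalse (by simp)
                have hrest' : pvFoldsOK (((pvGX g num.toNat g.length).length : Nat) : Int)
                    num rest false = true := by
                  rw [hglen₂]; exact hrest
                obtain ⟨g', pts', hA', hB', hnd', hmem'⟩ :=
                  ih (pvGX g num.toNat g.length) num (pvXFoldB pts W num) false
                    hrect₂ hnd₂ hmem₂ hrest'
                refine ⟨g', pts', ?_, ?_, hnd', hmem'⟩
                · simp only [pvLoopA, hsp, hint, pvSomeBind]
                  rw [hA2, pvSomeBind, if_neg (by simp)]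
                  exact hA'
                · simp only [pvLoopB, hsp, hint, pvSomeBind]
                  rw [if_neg (by decide : ¬ ("x" : String) = "y"), if_pos trivial,
                    if_pos hWn, if_neg (by simp)]
                  rw [hglen₂] at hB'
                  exact hB'
            · rw [if_neg hax] at hok
              simp at hok
      · simp at hok

-- ===== VERDICT support =====

theorem sol1_spec : Claim_equal_sol1 := by
  unfold Claim_equal_sol1
  intro data be _hdom hpre
  unfold Spec_sol1
  obtain ⟨grid, folds⟩ := data
  unfold Pre_sol1 at hpre
  rcases hpre with hnil | ⟨hrectb, hok⟩
  · simp only at hnil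
    subst hnil
    show (grid.foldl (fun result row =>
        row.foldl (fun r col => r + if col = "#" then 1 else 0) result) 0 : Int)
      = ((PySem.Set.ofList (pvPointsB grid)).length : Int)
    rw [pvPts0]
    exact pvCount_eq grid
  · simp only at hrectb hok
    have hrect : ∀ row ∈ grid, (row.length : Int) = ((grid.headD []).length : Int) := by
      intro row hr
      rw [List.all_eq_true] at hrectb
      have := hrectb row hr
      rw [decide_eq_true_eq] at this
      exact_mod_cast this
    obtain ⟨g', pts', hA, hB, hnd', hmem'⟩ :=
      pvMain folds grid ((grid.headD []).length : Int) (pvPointsB grid) be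
        hrect (pvNodupPointsB grid) (fun q => Iff.rfl) hok
    unfold sol1 sol1_alt
    dsimp only
    rw [pvPts0, hA, hB]
    show (g'.foldl (fun result row =>
        row.foldl (fun r col => r + if col = "#" then 1 else 0) result) 0 : Int)
      = ((pts'.length : Nat) : Int)
    rw [pvCount_eq]
    have := pvLengthEq pts' (pvPointsB g') hnd' (pvNodupPointsB g') hmem'
    exact_mod_cast this.symm
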